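-- pv_equiv track=rewrite | github.com/imsure/tech-interview-prep | py/leetcode_py/contest/96/884.py | decodeAtIndex
-- ===== SOURCE A (Python) =====
-- def decodeAtIndex(S, K):
--     """
--     :type S: str
--     :type K: int
--     :rtype: str
--     """
--     cur_len = 0
--     word, count = '', 0
--     for c in S:
--         if c.isalpha():
--             word += c
--             cur_len += 1
--         else:
--             d = int(c)
--             word *= d
--             cur_len = len(word)
--
--         if cur_len >= K:
--             return word[K-1]
--
--     return None
-- ===== SOURCE B (Python) =====
-- def decodeAtIndex(S, K):
--     """
--     :type S: str
--     :type K: int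
--     :rtype: str
--     """
--     # Forward: record only the decoded length after each character, stopping as
--     # soon as it reaches K; backward: reduce K modulo the block lengths.  The
--     # decoded string itself is never built.
--     sizes = []
--     size = 0
--     stopped = False
--     for c in S:
--         if c.isalpha():
--             size += 1
--         else:
--             size *= int(c)
--         sizes.append(size)
--         if size >= K:
--             stopped = True
--             break
--     if not stopped:
--         return None
--     for j in range(len(sizes) - 1, -1, -1):
--         c = S[j]
--         if c.isalpha():
--             if K == sizes[j]:
--                 return c
--         else:
--             K = (K - 1) % (sizes[j] // int(c)) + 1
--     return None
-- ===== Notes on version B (the rewrite author's own statement) =====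
-- stated objective: alternative
-- what changed: A materialises the decoded prefix string character by character (word += c / word *= d) and indexes into it; B never builds the decoded string: it records only the decoded length after each character (stopping, like A, once it reaches K), then walks backward reducing K modulo the preceding block length at each digit and returns the letter K lands on.
-- intended difference: For K = 0 on a string starting with a letter, A returns the first letter (word[K-1] is word[-1], Python's negative-index wraparound); B returns None, the intended value since no character has 1-based index 0. — e.g. on decodeAtIndex("a", 0): A returns some "a", B returns none
import Mathlib
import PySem

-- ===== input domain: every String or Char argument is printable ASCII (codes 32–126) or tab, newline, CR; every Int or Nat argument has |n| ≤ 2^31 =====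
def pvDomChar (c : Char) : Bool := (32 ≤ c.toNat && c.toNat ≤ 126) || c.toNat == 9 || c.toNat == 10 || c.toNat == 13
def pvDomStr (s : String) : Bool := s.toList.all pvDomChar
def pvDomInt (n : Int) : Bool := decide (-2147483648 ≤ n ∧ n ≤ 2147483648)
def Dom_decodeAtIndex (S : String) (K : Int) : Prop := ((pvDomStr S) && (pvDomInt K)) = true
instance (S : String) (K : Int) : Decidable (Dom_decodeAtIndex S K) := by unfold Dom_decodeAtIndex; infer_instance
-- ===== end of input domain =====

-- B never materialises the decoded string A builds: it records only decoded lengths forward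
-- (stopping, like A, as soon as the length reaches K), then walks backward reducing K modulo
-- the block lengths (alternative algorithm, same value).

-- ===== PORT A =====
-- A's loop: word/cur_len accumulators, early return word[K-1] once cur_len >= K; None at the end.
def pvGoA : List Char → List Char → Int → Int → Option String
  | [], _, _, _ => none
  | c :: rest, word, curLen, K =>
    match (if PySem.Chars.isalpha c then some (word ++ [c], curLen + 1)
           else (PySem.Int.ofChars? [c]).map
             (fun d => let w := PySem.List.pyRepeat word d; (w, (w.length : Int)))) with
    | none => none                   -- int(c) raises ValueError
    | some (word', curLen') =>
      if K ≤ curLen' then (PySem.List.pyGet? word' (K - 1)).map (fun ch => String.ofList [ch])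
      else pvGoA rest word' curLen' K

def decodeAtIndex (S : String) (K : Int) : Option String := pvGoA S.toList [] 0 K

-- ===== PORT B =====
-- Source B forward loop: decoded length after each character, break once size >= K
-- (returns the sizes list built so far and the 'stopped' flag).
def pvFwdB (K : Int) : List Char → Int → Option (List Int × Bool)
  | [], _ => some ([], false)        -- loop exhausted without break
  | c :: rest, size =>
    match (if PySem.Chars.isalpha c then some (size + 1)
           else (PySem.Int.ofChars? [c]).map (fun d => size * d)) with
    | none => none                   -- int(c) raises ValueError
    | some s =>
      if K ≤ s then some ([s], true)
      else (pvFwdB K rest s).map (fun p => (s :: p.1, p.2))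

-- Source B backward loop 'for j in range(len(sizes)-1, -1, -1)' reducing K.
def pvBackB (cs : List Char) (sizes : List Int) : List Int → Int → Option String
  | [], _ => none                    -- loop exhausted: implicit return None
  | j :: js, K =>
    match PySem.List.pyGet? cs j, PySem.List.pyGet? sizes j with
    | some c, some sz =>
      if PySem.Chars.isalpha c then
        if K = sz then some (String.ofList [c])
        else pvBackB cs sizes js K
      else
        match PySem.Int.ofChars? [c] with
        | none => none               -- int(c) raises ValueError
        | some d =>
          match PySem.Int.floordiv? sz d with
          | none => none             -- sizes[j] // 0 raises ZeroDivisionError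
          | some q =>
            match PySem.Int.mod? (K - 1) q with
            | none => none           -- (K-1) % 0 raises ZeroDivisionError
            | some m => pvBackB cs sizes js (m + 1)
    | _, _ => none                   -- S[j]/sizes[j] raises IndexError

def decodeAtIndex_alt (S : String) (K : Int) : Option String :=
  match pvFwdB K S.toList 0 with
  | none => none
  | some (_, false) => none          -- 'if not stopped: return None'
  | some (sizes, true) =>
      pvBackB S.toList sizes (PySem.List.pyRange ((sizes.length : Int) - 1) (-1) (-1)) K

-- ===== PRECONDITION & SPEC =====
-- the decoded-length step (a quantity of the problem statement, used only by Pre_)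
def pvDStep (size : Int) (c : Char) : Int :=
  if PySem.Chars.isalpha c then size + 1 else size * ((c.toNat : Int) - 48)

-- Pre_ excludes exactly the inputs on which A raises: a non-alphanumeric character reached
-- before any decoded prefix has length ≥ K (ValueError at int(c)), and K ≤ 0 on a non-empty
-- string (word[K-1] raises IndexError) except K = 0 with a leading letter, where A returns
-- (flagged as D_ below).  pvPrefixAlnumOk carries (decoded length so far, length K reached
-- yet, all chars so far needed were alnum): every character at or before the first position
-- whose decoded prefix length reaches K must be alphanumeric.
def pvPrefixAlnumOk (K : Int) (cs : List Char) : Bool :=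
  (cs.foldl
    (fun (st : Int × Bool × Bool) c =>
      let size := pvDStep st.1 c
      (size, st.2.1 || decide (K ≤ size), st.2.2 && (st.2.1 || PySem.Chars.isalnum c)))
    (0, false, true)).2.2

def Pre_decodeAtIndex (S : String) (K : Int) : Prop :=
  pvPrefixAlnumOk K S.toList = true ∧
  (1 ≤ K ∨ S.toList = [] ∨ (K = 0 ∧ PySem.Chars.isalpha S.toList.headI = true))
instance (S : String) (K : Int) : Decidable (Pre_decodeAtIndex S K) := by
  unfold Pre_decodeAtIndex; infer_instance

def pvWitness_decodeAtIndex : String × Int := ("ab2c", 3)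

-- For K = 0 on a string starting with a letter A returns the first letter (word[K-1] = word[-1],
-- Python's negative-index wraparound); B returns None, the intended value since no character has
-- 1-based index 0.
def D_decodeAtIndex (S : String) (K : Int) : Prop :=
  K = 0 ∧ S.toList ≠ [] ∧ PySem.Chars.isalpha S.toList.headI = true
instance (S : String) (K : Int) : Decidable (D_decodeAtIndex S K) := by
  unfold D_decodeAtIndex; infer_instance

def Spec_decodeAtIndex (S : String) (K : Int) (out : Option String) : Prop :=
  ¬ D_decodeAtIndex S K → out = decodeAtIndex_alt S K
instance (S : String) (K : Int) (out : Option String) : Decidable (Spec_decodeAtIndex S K out) := by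
  unfold Spec_decodeAtIndex; infer_instance

def pvDiffWitness_decodeAtIndex : String × Int := ("a", 0)
def pvDiffWitnessOut_decodeAtIndex : (Option String) × (Option String) := (some "a", none)

-- ===== CLAIM (what is proved, stated in full; the proofs are below) =====
def Claim_unchanged_decodeAtIndex : Prop := ∀ (S : String) (K : Int), Dom_decodeAtIndex S K → Pre_decodeAtIndex S K → Spec_decodeAtIndex S K (decodeAtIndex S K)
def Claim_changed_decodeAtIndex : Prop := Dom_decodeAtIndex (pvDiffWitness_decodeAtIndex.1) (pvDiffWitness_decodeAtIndex.2) ∧ Pre_decodeAtIndex (pvDiffWitness_decodeAtIndex.1) (pvDiffWitness_decodeAtIndex.2) ∧ D_decodeAtIndex (pvDiffWitness_decodeAtIndex.1) (pvDiffWitness_decodeAtIndex.2) ∧ decodeAtIndex (pvDiffWitness_decodeAtIndex.1) (pvDiffWitness_decodeAtIndex.2) = pvDiffWitnessOut_decodeAtIndex.1 ∧ decodeAtIndex_alt (pvDiffWitness_decodeAtIndex.1) (pvDiffWitness_decodeAtIndex.2) = pvDiffWitnessOut_decodeAtIndex.2 ∧ pvDiffWitnessOut_decodeAtIndex.1 ≠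 pvDiffWitnessOut_decodeAtIndex.2
def Claim_exact_decodeAtIndex : Prop := ∀ (S : String) (K : Int), Dom_decodeAtIndex S K → Pre_decodeAtIndex S K → D_decodeAtIndex S K → decodeAtIndex S K ≠ decodeAtIndex_alt S K

-- ===== LEMMAS AND PROOFS =====

theorem char_eq_of_toNat (c : Char) (n : Nat) (d : Char) (h : c.toNat = n) (hd : d.toNat = n) :
    c = d := by
  apply Char.ext
  apply UInt32.toNat_inj.mp
  show c.toNat = d.toNat
  omega

theorem isdigit_bounds (c : Char) (h : PySem.Chars.isdigit c = true) :
    48 ≤ c.toNat ∧ c.toNat ≤ 57 := by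
  simp [PySem.Chars.isdigit, Char.le_def, UInt32.le_iff_toNat_le] at h
  exact ⟨h.1, h.2⟩

theorem ofChars?_digit (c : Char) (h : PySem.Chars.isdigit c = true) :
    PySem.Int.ofChars? [c] = some ((c.toNat : Int) - 48) := by
  obtain ⟨h1, h2⟩ := isdigit_bounds c h
  interval_cases h : (c.toNat) <;>
  first
  | (rw [char_eq_of_toNat c 48 '0' h (by decide)]; decide)
  | (rw [char_eq_of_toNat c 49 '1' h (by decide)]; decide)
  | (rw [char_eq_of_toNat c 50 '2' h (by decide)]; decide)
  | (rw [char_eq_of_toNat c 51 '3' h (by decide)]; decide)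
  | (rw [char_eq_of_toNat c 52 '4' h (by decide)]; decide)
  | (rw [char_eq_of_toNat c 53 '5' h (by decide)]; decide)
  | (rw [char_eq_of_toNat c 54 '6' h (by decide)]; decide)
  | (rw [char_eq_of_toNat c 55 '7' h (by decide)]; decide)
  | (rw [char_eq_of_toNat c 56 '8' h (by decide)]; decide)
  | (rw [char_eq_of_toNat c 57 '9' h (by decide)]; decide)

theorem isdigit_of_alnum (c : Char) (hc : PySem.Chars.isalnum c = true)
    (ha : ¬ PySem.Chars.isalpha c = true) : PySem.Chars.isdigit c = true := by
  simp [PySem.Chars.isalnum] at hc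
  tauto

-- the decoded-prefix step: the word transformer both programs implement (proof-side model)
def pvStep (w : List Char) (c : Char) : List Char :=
  if PySem.Chars.isalpha c then w ++ [c] else PySem.List.pyRepeat w ((c.toNat : Int) - 48)

-- model of the full sizes list: the decoded length after each character
def pvSizesM (w : List Char) : List Char → List Int
  | [] => []
  | c :: rest => (((pvStep w c).length : Int)) :: pvSizesM (pvStep w c) rest

theorem length_pyRepeat {α : Type} (w : List α) (d : Int) :
    (PySem.List.pyRepeat w d).length = d.toNat * w.length := by
  simp [PySem.List.pyRepeat]

theorem getElem?_pyRepeat {α : Type} (w : List α) (n m : Nat) (hm : m < n * w.length) :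
    ((List.replicate n w).flatten)[m]? = w[m % w.length]? := by
  induction n generalizing m with
  | zero => omega
  | succ n ih =>
    rw [List.replicate_succ, List.flatten_cons]
    by_cases hlt : m < w.length
    · rw [List.getElem?_append_left hlt, Nat.mod_eq_of_lt hlt]
    · have hle : w.length ≤ m := by omega
      have hs : (n + 1) * w.length = n * w.length + w.length := Nat.succ_mul n w.length
      rw [List.getElem?_append_right hle, ih (m - w.length) (by omega),
        Nat.mod_eq_sub_mod hle]

theorem len_step_alpha (w : List Char) (c : Char) (ha : PySem.Chars.isalpha c = true) :
    pvStep w c = w ++ [c] := by simp [pvStep, ha]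

theorem len_step_digit (w : List Char) (c : Char) (ha : ¬ PySem.Chars.isalpha c = true) :
    pvStep w c = PySem.List.pyRepeat w ((c.toNat : Int) - 48) := by simp [pvStep, ha]

theorem cast_len_step_digit (w : List Char) (c : Char)
    (hd : PySem.Chars.isdigit c = true) :
    (((PySem.List.pyRepeat w ((c.toNat : Int) - 48)).length : Int)) =
      (w.length : Int) * ((c.toNat : Int) - 48) := by
  have h48 := (isdigit_bounds c hd).1
  have hd0 : (0 : Int) ≤ (c.toNat : Int) - 48 := by omega
  rw [length_pyRepeat]
  push_cast
  rw [Int.toNat_of_nonneg hd0]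
  ring

theorem len_step (w : List Char) (c : Char) (hc : PySem.Chars.isalnum c = true) :
    (((pvStep w c).length : Int)) = pvDStep ((w.length : Int)) c := by
  by_cases ha : PySem.Chars.isalpha c = true
  · simp [pvStep, pvDStep, ha]
  · have hd := isdigit_of_alnum c hc ha
    simp only [pvStep, pvDStep, ha, Bool.false_eq_true, if_false]
    exact cast_len_step_digit w c hd

theorem length_pvSizesM (cs w : List Char) : (pvSizesM w cs).length = cs.length := by
  induction cs generalizing w with
  | nil => rfl
  | cons c rest ih => simp [pvSizesM, ih]

theorem take_succ_getElem {α : Type} (cs : List α) (j : Nat) (hj : j < cs.length) :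
    cs.take (j + 1) = cs.take j ++ [cs[j]] := by
  rw [List.take_add_one, List.getElem?_eq_getElem hj]
  rfl

theorem pvSizesM_getElem? (cs : List Char) (w : List Char) (j : Nat) (hj : j < cs.length) :
    (pvSizesM w cs)[j]? = some ((List.foldl pvStep w (cs.take (j + 1))).length : Int) := by
  induction cs generalizing w j with
  | nil => simp at hj
  | cons c rest ih =>
    cases j with
    | zero => simp [pvSizesM]
    | succ j' =>
      have hj' : j' < rest.length := by simpa using hj
      simp only [pvSizesM, List.getElem?_cons_succ, List.take_succ_cons, List.foldl_cons]
      exact ih (pvStep w c) j' hj'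

-- "every character up to and including the first position whose decoded length reaches K
-- is alphanumeric" (structural form of Pre_'s first clause, for the inductions)
def pvOK (K : Int) : List Char → Int → Prop
  | [], _ => True
  | c :: rest, sz => PySem.Chars.isalnum c = true ∧
      (K ≤ pvDStep sz c ∨ pvOK K rest (pvDStep sz c))

theorem pvFoldOk_init (K : Int) (cs : List Char) (st : Int × Bool × Bool)
    (h : (cs.foldl
      (fun (st : Int × Bool × Bool) c =>
        let size := pvDStep st.1 c
        (size, st.2.1 || decide (K ≤ size), st.2.2 && (st.2.1 || PySem.Chars.isalnum c)))
      st).2.2 = true) : st.2.2 = true := by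
  induction cs generalizing st with
  | nil => exact h
  | cons c rest ih =>
    have := ih _ h
    simp only [Bool.and_eq_true] at this
    exact this.1

theorem pvOK_of_fold (K : Int) (cs : List Char) (sz : Int)
    (h : (cs.foldl
      (fun (st : Int × Bool × Bool) c =>
        let size := pvDStep st.1 c
        (size, st.2.1 || decide (K ≤ size), st.2.2 && (st.2.1 || PySem.Chars.isalnum c)))
      (sz, false, true)).2.2 = true) : pvOK K cs sz := by
  induction cs generalizing sz with
  | nil => trivial
  | cons c rest ih =>
    rw [List.foldl_cons] at h
    have hc : PySem.Chars.isalnum c = true := by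
      have := pvFoldOk_init K rest _ h
      simpa using this
    by_cases hK : K ≤ pvDStep sz c
    · exact ⟨hc, Or.inl hK⟩
    · refine ⟨hc, Or.inr (ih (pvDStep sz c) ?_)⟩
      simpa [hc, hK] using h

theorem pvGoA_eq (cs : List Char) (w : List Char) (K : Int)
    (hok : pvOK K cs ((w.length : Int))) :
    pvGoA cs w ((w.length : Int)) K =
      match (pvSizesM w cs).findIdx? (fun s => decide (K ≤ s)) with
      | none => none
      | some t => (PySem.List.pyGet? (List.foldl pvStep w (cs.take (t + 1))) (K - 1)).map
          (fun ch => String.ofList [ch]) := by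
  induction cs generalizing w with
  | nil => rfl
  | cons c rest ih =>
    obtain ⟨hc, hd⟩ := hok
    have hlen := len_step w c hc
    by_cases ha : PySem.Chars.isalpha c = true
    · have e : (w.length : Int) + 1 = (((w ++ [c]).length : Int)) := by simp
      rw [pvGoA]
      simp only [ha, if_true, pvSizesM, List.findIdx?_cons, len_step_alpha w c ha, ← e]
      by_cases hK : K ≤ (w.length : Int) + 1
      · simp [hK, List.take_succ_cons, List.foldl_cons, len_step_alpha w c ha]
      · have hok' : pvOK K rest (((w ++ [c]).length : Int)) := by
          rcases hd with hKd | hok'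
          · exfalso
            apply hK
            rw [← hlen] at hKd
            rw [len_step_alpha w c ha] at hKd
            omega
          · rw [← hlen] at hok'
            rwa [len_step_alpha w c ha] at hok'
        simp only [hK, decide_false, Bool.false_eq_true, if_false]
        rw [e, ih (w ++ [c]) hok']
        cases (pvSizesM (w ++ [c]) rest).findIdx? (fun s => decide (K ≤ s)) with
        | none => rfl
        | some t => simp [List.take_succ_cons, List.foldl_cons, len_step_alpha w c ha]
    · have hdg := isdigit_of_alnum c hc ha
      rw [pvGoA]
      simp only [ha, Bool.false_eq_true, if_false, ofChars?_digit c hdg, Option.map_some,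
        pvSizesM, List.findIdx?_cons]
      rw [show PySem.List.pyRepeat w ((c.toNat : Int) - 48) = pvStep w c from
        (len_step_digit w c ha).symm]
      by_cases hK : K ≤ (((pvStep w c).length : Int))
      · simp [hK, List.take_succ_cons, List.foldl_cons]
      · have hok' : pvOK K rest (((pvStep w c).length : Int)) := by
          rcases hd with hKd | hok'
          · exact absurd (hlen ▸ hKd) hK
          · rwa [← hlen] at hok'
        simp only [hK, decide_false, Bool.false_eq_true, if_false]
        rw [ih (pvStep w c) hok']
        cases (pvSizesM (pvStep w c) rest).findIdx? (fun s => decide (K ≤ s)) with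
        | none => rfl
        | some t => simp [List.take_succ_cons, List.foldl_cons]

theorem pvFwdB_eq (cs : List Char) (w : List Char) (K : Int)
    (hok : pvOK K cs ((w.length : Int))) :
    pvFwdB K cs ((w.length : Int)) = some (
      match (pvSizesM w cs).findIdx? (fun s => decide (K ≤ s)) with
      | none => (pvSizesM w cs, false)
      | some t => ((pvSizesM w cs).take (t + 1), true)) := by
  induction cs generalizing w with
  | nil => rfl
  | cons c rest ih =>
    obtain ⟨hc, hd⟩ := hok
    have hlen := len_step w c hc
    have harm : (if PySem.Chars.isalpha c then some ((w.length : Int) + 1)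
        else (PySem.Int.ofChars? [c]).map (fun d => (w.length : Int) * d)) =
        some (((pvStep w c).length : Int)) := by
      by_cases ha : PySem.Chars.isalpha c = true
      · simp [ha, len_step_alpha w c ha]
      · have hdg := isdigit_of_alnum c hc ha
        simp only [ha, Bool.false_eq_true, if_false, ofChars?_digit c hdg, Option.map_some]
        rw [len_step_digit w c ha, cast_len_step_digit w c hdg]
    rw [pvFwdB, harm]
    simp only [pvSizesM, List.findIdx?_cons]
    by_cases hK : K ≤ (((pvStep w c).length : Int))
    · simp [hK, List.take_succ_cons]
    · have hok' : pvOK K rest (((pvStep w c).length : Int)) := by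
        rcases hd with hKd | hok'
        · exact absurd (hlen ▸ hKd) hK
        · rwa [← hlen] at hok'
      simp only [hK, decide_false, Bool.false_eq_true, if_false]
      rw [ih (pvStep w c) hok']
      cases (pvSizesM (pvStep w c) rest).findIdx? (fun s => decide (K ≤ s)) with
      | none => rfl
      | some t => simp [List.take_succ_cons]

theorem pvOK_take_alnum (K : Int) (cs : List Char) (w : List Char) (t : Nat)
    (hok : pvOK K cs ((w.length : Int)))
    (ht : (pvSizesM w cs).findIdx? (fun s => decide (K ≤ s)) = some t) :
    ∀ j, j ≤ t → PySem.Chars.isalnum (cs.getD j ' ') = true := by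
  induction cs generalizing w t with
  | nil => simp [pvSizesM] at ht
  | cons c rest ih =>
    obtain ⟨hc, hd⟩ := hok
    have hlen := len_step w c hc
    simp only [pvSizesM, List.findIdx?_cons] at ht
    by_cases hK : K ≤ (((pvStep w c).length : Int))
    · rw [if_pos (by simpa using hK)] at ht
      intro j hj
      have : t = 0 := by simpa using ht.symm
      have : j = 0 := by omega
      simpa [this, List.getD]
    · rw [if_neg (by simpa using hK)] at ht
      have hok' : pvOK K rest (((pvStep w c).length : Int)) := by
        rcases hd with hKd | hok'
        · exact absurd (hlen ▸ hKd) hK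
        · rwa [← hlen] at hok'
      cases hfi : (pvSizesM (pvStep w c) rest).findIdx? (fun s => decide (K ≤ s)) with
      | none => rw [hfi] at ht; simp at ht
      | some t' =>
        rw [hfi] at ht
        simp only [Option.map_some, Option.some.injEq] at ht
        intro j hj
        cases j with
        | zero => simpa [List.getD]
        | succ j' =>
          rw [List.getD_cons_succ]
          exact ih (pvStep w c) t' hok' hfi j' (by omega)

theorem pvBackB_correct (cs : List Char) (sizes : List Int) (j : Nat) (K' : Int)
    (hj : j < cs.length)
    (halnum : ∀ j', j' ≤ j → PySem.Chars.isalnum (cs.getD j' ' ') = true)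
    (hsz : ∀ j', j' ≤ j →
      sizes[j']? = some (((List.foldl pvStep [] (cs.take (j' + 1))).length : Int)))
    (hk1 : 1 ≤ K')
    (hk2 : K' ≤ ((List.foldl pvStep [] (cs.take (j + 1))).length : Int)) :
    pvBackB cs sizes (PySem.List.pyRange (j : Int) (-1) (-1)) K' =
      (PySem.List.pyGet? (List.foldl pvStep [] (cs.take (j + 1))) (K' - 1)).map
        (fun ch => String.ofList [ch]) := by
  induction j generalizing K' with
  | zero =>
    have hc : PySem.Chars.isalnum cs[0] = true := by
      have := halnum 0 (le_refl 0)
      rwa [List.getD_eq_getElem cs ' ' hj] at this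
    have htake : cs.take 1 = [cs[0]] := take_succ_getElem cs 0 hj
    rw [show PySem.List.pyRange ((0 : Nat) : Int) (-1) (-1) = [((0 : Nat) : Int)] from by decide]
    rw [pvBackB, PySem.List.pyGet?_natCast cs 0, List.getElem?_eq_getElem hj,
      PySem.List.pyGet?_natCast sizes 0, hsz 0 (le_refl 0)]
    rw [htake] at hk2 ⊢
    simp only [List.foldl_cons, List.foldl_nil] at hk2 ⊢
    by_cases ha : PySem.Chars.isalpha cs[0] = true
    · simp only [len_step_alpha _ _ ha, List.nil_append] at hk2 ⊢
      have hK : K' = 1 := by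
        simp at hk2
        omega
      subst hK
      simp [ha]
    · exfalso
      rw [len_step_digit _ _ ha, length_pyRepeat] at hk2
      simp at hk2
      omega
  | succ j' ih =>
    have hj'' : j' < cs.length := by omega
    have hc : PySem.Chars.isalnum cs[j' + 1] = true := by
      have := halnum (j' + 1) (le_refl _)
      rwa [List.getD_eq_getElem cs ' ' hj] at this
    have htake : cs.take (j' + 1 + 1) = cs.take (j' + 1) ++ [cs[j' + 1]] :=
      take_succ_getElem cs (j' + 1) hj
    set w := List.foldl pvStep [] (cs.take (j' + 1)) with hw
    have hfold : List.foldl pvStep [] (cs.take (j' + 1 + 1)) = pvStep w cs[j' + 1] := by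
      rw [htake, List.foldl_append]
      rfl
    have halnum' : ∀ i, i ≤ j' → PySem.Chars.isalnum (cs.getD i ' ') = true :=
      fun i hi => halnum i (Nat.le_succ_of_le hi)
    have hsz' : ∀ i, i ≤ j' →
        sizes[i]? = some (((List.foldl pvStep [] (cs.take (i + 1))).length : Int)) :=
      fun i hi => hsz i (Nat.le_succ_of_le hi)
    rw [PySem.List.pyRange_neg_one_cons (by omega : (-1 : Int) < ((j' + 1 : Nat) : Int))]
    rw [show (((j' + 1 : Nat) : Int) - 1) = ((j' : Nat) : Int) from by push_cast; ring]
    rw [pvBackB, PySem.List.pyGet?_natCast cs (j' + 1), List.getElem?_eq_getElem hj,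
      PySem.List.pyGet?_natCast sizes (j' + 1), hsz (j' + 1) (le_refl _), hfold]
    rw [hfold] at hk2
    by_cases ha : PySem.Chars.isalpha cs[j' + 1] = true
    · simp only [len_step_alpha _ _ ha] at hk2 ⊢
      simp only [ha, if_true]
      by_cases hK : K' = ((w ++ [cs[j' + 1]]).length : Int)
      · simp only [hK]
        have h1 : ((w ++ [cs[j' + 1]]).length : Int) - 1 = ((w.length : Nat) : Int) := by
          simp
        rw [h1, PySem.List.pyGet?_natCast]
        rw [List.getElem?_concat_length]
        rfl
      · have hlen : ((w ++ [cs[j' + 1]]).length : Int) = (w.length : Int) + 1 := by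
          simp
        have hk2' : K' ≤ (w.length : Int) := by omega
        rw [if_neg hK, ih K' hj'' halnum' hsz' hk1 hk2']
        have hnn : K' - 1 = (((K' - 1).toNat : Nat) : Int) := by omega
        rw [hnn, PySem.List.pyGet?_natCast, PySem.List.pyGet?_natCast]
        rw [List.getElem?_append_left (by omega)]
    · have hd := isdigit_of_alnum _ hc ha
      have hd0 : (0 : Int) ≤ (cs[j' + 1].toNat : Int) - 48 := by
        have := (isdigit_bounds _ hd).1
        omega
      set d : Int := (cs[j' + 1].toNat : Int) - 48 with hdd
      simp only [len_step_digit _ _ ha] at hk2 ⊢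
      have hlen : ((PySem.List.pyRepeat w d).length : Int) = ((d.toNat * w.length : Nat) : Int) := by
        rw [length_pyRepeat]
      rw [hlen] at hk2
      have hprodpos : 1 ≤ d.toNat * w.length := by omega
      have hdpos : d.toNat ≠ 0 ∧ w.length ≠ 0 := by
        rw [← Nat.mul_ne_zero_iff]
        omega
      have hdne : d ≠ 0 := by omega
      simp only [ha, Bool.false_eq_true, if_false, ofChars?_digit _ hd, ← hdd]
      rw [hlen]
      have hdcast : d = ((d.toNat : Nat) : Int) := by omega
      have hq : Int.fdiv ((d.toNat * w.length : Nat) : Int) d = ((w.length : Nat) : Int) := by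
        have h1 := PySem.Int.floordiv_natCast (d.toNat * w.length) d.toNat
        rw [Nat.mul_div_cancel_left _ (by omega)] at h1
        rw [← hdcast] at h1
        exact h1
      have hfd : PySem.Int.floordiv? ((d.toNat * w.length : Nat) : Int) d =
          some ((w.length : Nat) : Int) := by
        unfold PySem.Int.floordiv?
        rw [if_neg hdne, hq]
      have hknn : K' - 1 = (((K' - 1).toNat : Nat) : Int) := by omega
      have hm : Int.fmod (K' - 1) ((w.length : Nat) : Int) =
          ((((K' - 1).toNat % w.length : Nat)) : Int) := by
        rw [hknn]
        exact PySem.Int.mod_natCast _ _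
      have hmd : PySem.Int.mod? (K' - 1) ((w.length : Nat) : Int) =
          some ((((K' - 1).toNat % w.length : Nat)) : Int) := by
        unfold PySem.Int.mod?
        rw [if_neg (by omega : ((w.length : Nat) : Int) ≠ 0), hm]
      simp only [hfd, hmd]
      have hmod_lt : (K' - 1).toNat % w.length < w.length := Nat.mod_lt _ (by omega)
      have hk1' : 1 ≤ ((((K' - 1).toNat % w.length : Nat) : Int)) + 1 := by omega
      have hk2' : ((((K' - 1).toNat % w.length : Nat) : Int)) + 1 ≤ (w.length : Int) := by omega
      rw [ih _ hj'' halnum' hsz' hk1' hk2']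
      have h2 : ((((K' - 1).toNat % w.length : Nat) : Int)) + 1 - 1 =
          ((((K' - 1).toNat % w.length : Nat)) : Int) := by omega
      rw [h2, PySem.List.pyGet?_natCast, hknn, PySem.List.pyGet?_natCast]
      show _ = (((List.replicate d.toNat w).flatten)[(K' - 1).toNat]?.map
          (fun ch => String.ofList [ch]))
      rw [getElem?_pyRepeat w d.toNat (K' - 1).toNat (by omega)]
      simp

-- ===== VERDICT (by name: the statement is the Claim_ definition above) =====
theorem decodeAtIndex_spec : Claim_unchanged_decodeAtIndex := by
  intro S K _ hpre hnd
  obtain ⟨hidx, hk⟩ := hpre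
  show decodeAtIndex S K = decodeAtIndex_alt S K
  have hempty_case : S.toList = [] → decodeAtIndex S K = decodeAtIndex_alt S K := by
    intro he
    unfold decodeAtIndex decodeAtIndex_alt
    rw [he]
    rfl
  rcases hk with hk | he | ⟨hk0, hhead⟩
  · have hok : pvOK K S.toList 0 := pvOK_of_fold K S.toList 0 hidx
    have hok' : pvOK K S.toList ((([] : List Char).length : Int)) := by simpa using hok
    unfold decodeAtIndex decodeAtIndex_alt
    have hA := pvGoA_eq S.toList [] K hok'
    have hB := pvFwdB_eq S.toList [] K hok'
    simp only [List.length_nil, Nat.cast_zero] at hA hB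
    rw [hA, hB]
    cases hfi : (pvSizesM [] S.toList).findIdx? (fun s => decide (K ≤ s)) with
    | none => rfl
    | some t =>
      obtain ⟨htl, hp, _⟩ := List.findIdx?_eq_some_iff_getElem.mp hfi
      have ht : t < S.toList.length := by rwa [length_pvSizesM] at htl
      have hlen_take : ((pvSizesM [] S.toList).take (t + 1)).length = t + 1 := by
        rw [List.length_take]
        omega
      have hrange : (((((pvSizesM [] S.toList).take (t + 1)).length : Nat) : Int) - 1) =
          ((t : Nat) : Int) := by
        rw [hlen_take]
        push_cast
        ring
      simp only [hrange]
      have hsz : ∀ j', j' ≤ t →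
          ((pvSizesM [] S.toList).take (t + 1))[j']? =
            some (((List.foldl pvStep [] (S.toList.take (j' + 1))).length : Int)) := by
        intro j' hj'
        rw [List.getElem?_take_of_lt (by omega)]
        exact pvSizesM_getElem? S.toList [] j' (by omega)
      have halnum := pvOK_take_alnum K S.toList [] t (by simpa using hok) hfi
      have hval := pvSizesM_getElem? S.toList [] t ht
      rw [List.getElem?_eq_getElem htl] at hval
      have hK2 : K ≤ ((List.foldl pvStep [] (S.toList.take (t + 1))).length : Int) := by
        have := of_decide_eq_true hp
        rwa [Option.some.inj hval] at this
      exact (pvBackB_correct S.toList ((pvSizesM [] S.toList).take (t + 1)) t K ht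
        halnum hsz hk hK2).symm
  · exact hempty_case he
  · by_cases hne : S.toList = []
    · exact hempty_case hne
    · exact absurd ⟨hk0, hne, hhead⟩ hnd

set_option maxRecDepth 4096 in
theorem decodeAtIndex_changed : Claim_changed_decodeAtIndex := by
  unfold Claim_changed_decodeAtIndex
  refine ⟨by decide, by decide, by decide, rfl, rfl, by decide⟩

theorem decodeAtIndex_tight : Claim_exact_decodeAtIndex := by
  intro S K _ _ hD
  obtain ⟨hk0, hne, hhead⟩ := hD
  subst hk0
  cases hcs : S.toList with
  | nil => exact absurd hcs hne
  | cons c rest =>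
    have ha : PySem.Chars.isalpha c = true := by
      rw [hcs] at hhead
      simpa using hhead
    have hA : decodeAtIndex S 0 = some (String.ofList [c]) := by
      unfold decodeAtIndex
      rw [hcs, pvGoA]
      simp only [ha, if_true, List.nil_append]
      rw [if_pos (by norm_num), show ((0 : Int) - 1) = -1 from by norm_num,
        PySem.List.pyGet?_neg_one]
      simp
    have hB : decodeAtIndex_alt S 0 = none := by
      unfold decodeAtIndex_alt
      rw [hcs, pvFwdB]
      simp only [ha, if_true]
      rw [if_pos (by norm_num : (0 : Int) ≤ 0 + 1)]
      show pvBackB (c :: rest) [0 + 1]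
        (PySem.List.pyRange ((([(0 : Int) + 1].length : Nat) : Int) - 1) (-1) (-1)) 0 = none
      rw [show ((([(0 : Int) + 1].length : Nat) : Int) - 1) = ((0 : Nat) : Int) from by simp]
      rw [show PySem.List.pyRange ((0 : Nat) : Int) (-1) (-1) = [((0 : Nat) : Int)] from by decide]
      rw [pvBackB, PySem.List.pyGet?_natCast, PySem.List.pyGet?_natCast]
      simp [ha]
      rfl
    rw [hA, hB]
    simp
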